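-- pv_equiv track=rewrite | github.com/saraxmartin/ComputerLogics | Task1_2.py | NoBracketsAndDiffConnectors
-- ===== SOURCE A (Python) =====
-- def IsOpeningBracket(char):
--     return (char=="(" or char=="[")
--
-- def IsClosingBracket(char):
--     return (char==")" or char=="]")
--
-- def IsConnector(char):
--     return (char=="|" or char=="&" or char=="-" or char=="+")
--
-- def NoBracketsAndDiffConnectors(expression):
--     connectors=[]
--     for char in expression:
--         if (IsOpeningBracket(char) or IsClosingBracket(char)):
--             return False
--         elif IsConnector(char):
--             if char not in connectors:
--                 connectors.append(char)
--     if len(connectors)==1: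
--         return False
--     else:
--         return True
-- ===== SOURCE B (Python) =====
-- def NoBracketsAndDiffConnectors(expression):
--     if any(b in expression for b in "()[]"):
--         return False
--     return sum(c in expression for c in "|&-+") != 1
-- ===== Notes on version B (the rewrite author's own statement) =====
-- stated objective: faster
-- what changed: Inverts the traversal: instead of an interpreted per-character loop over the expression with an early return and a distinct-connectors accumulator list, B iterates over the fixed eight-symbol alphabet, testing each bracket and connector with a C-level substring membership scan, and compares the count of connector types present with 1.
import Mathlib
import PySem

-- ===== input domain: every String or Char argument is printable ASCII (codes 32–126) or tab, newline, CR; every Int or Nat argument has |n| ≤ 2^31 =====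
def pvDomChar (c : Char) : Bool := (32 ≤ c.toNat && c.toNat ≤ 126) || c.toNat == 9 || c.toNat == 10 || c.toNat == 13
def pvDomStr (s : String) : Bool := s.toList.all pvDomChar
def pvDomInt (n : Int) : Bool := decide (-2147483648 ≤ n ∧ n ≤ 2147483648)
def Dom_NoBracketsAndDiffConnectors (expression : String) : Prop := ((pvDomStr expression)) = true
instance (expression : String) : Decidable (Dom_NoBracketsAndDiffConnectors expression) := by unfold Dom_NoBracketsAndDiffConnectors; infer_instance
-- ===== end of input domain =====

-- B inverts the traversal: it tests each of the fixed 8 bracket/connector symbols for membership in the expression (C-level scans) instead of looping over the expression per character with an accumulator; measured faster in a timing run.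


-- ===== PORT A =====
def IsOpeningBracket (char : Char) : Bool := char == '(' || char == '['

def IsClosingBracket (char : Char) : Bool := char == ')' || char == ']'

def IsConnector (char : Char) : Bool := char == '|' || char == '&' || char == '-' || char == '+'

-- the for-loop over expression with the 'connectors' accumulator; the early 'return False' becomes an immediate false
def pvLoopA : List Char → List Char → Bool
  | [], connectors => if connectors.length == 1 then false else true
  | char :: rest, connectors =>
    if IsOpeningBracket char || IsClosingBracket char then false
    else if IsConnector char then
      (if !(connectors.contains char) then pvLoopA rest (connectors ++ [char])
       else pvLoopA rest connectors)
    else pvLoopA rest connectors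

def NoBracketsAndDiffConnectors (expression : String) : Bool :=
  pvLoopA expression.toList []

-- ===== PORT B =====
-- 'b in expression' with a single-character needle b is exactly character membership, ported as contains on toList
def NoBracketsAndDiffConnectors_alt (expression : String) : Bool :=
  if (['(', ')', '[', ']'] : List Char).any (fun b => expression.toList.contains b) then false
  else decide (((['|', '&', '-', '+'] : List Char).map
      (fun c => if expression.toList.contains c then (1 : Int) else 0)).sum ≠ 1)

-- ===== PRECONDITION & SPEC =====
def Spec_NoBracketsAndDiffConnectors (expression : String) (out : Bool) : Prop := out = NoBracketsAndDiffConnectors_alt expression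
instance (expression : String) (out : Bool) : Decidable (Spec_NoBracketsAndDiffConnectors expression out) := by unfold Spec_NoBracketsAndDiffConnectors; infer_instance

-- ===== CLAIM =====
def Claim_equal_NoBracketsAndDiffConnectors : Prop := ∀ (expression : String), Dom_NoBracketsAndDiffConnectors expression → Spec_NoBracketsAndDiffConnectors expression (NoBracketsAndDiffConnectors expression)

-- ===== LEMMAS AND PROOFS =====

-- A's loop, characterised: false on any bracket, else the ≠1 test on the Set.add-fold of the connectors
theorem pvLoopA_char (l : List Char) (acc : List Char) :
    pvLoopA l acc =
      if l.any (fun c => IsOpeningBracket c || IsClosingBracket c) then false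
      else decide ((l.foldl (fun s c => if IsConnector c then PySem.Set.add s c else s) acc).length ≠ 1) := by
  induction l generalizing acc with
  | nil => simp [pvLoopA]
  | cons c rest ih =>
    by_cases hb : (IsOpeningBracket c || IsClosingBracket c) = true
    · simp [pvLoopA, hb]
    · by_cases hc : IsConnector c = true
      · by_cases hm : c ∈ acc <;>
          simp [pvLoopA, hb, hc, hm, ih, PySem.Set.add, PySem.Set.contains,
            List.contains_eq_mem]
      · simp [pvLoopA, hb, hc, ih]

-- a conditioned Set.add-fold is a Set.add-fold over the filtered list
theorem foldl_add_filter (l : List Char) (acc : PySem.Set Char) (p : Char → Bool) :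
    l.foldl (fun s c => if p c then PySem.Set.add s c else s) acc
      = (l.filter p).foldl PySem.Set.add acc := by
  induction l generalizing acc with
  | nil => rfl
  | cons c rest ih => by_cases h : p c = true <;> simp [h, ih]

-- A's bracket test on one char is membership in B's bracket alphabet
theorem bracket_mem (c : Char) :
    (IsOpeningBracket c || IsClosingBracket c)
      = (['(', ')', '[', ']'] : List Char).contains c := by
  simp only [IsOpeningBracket, IsClosingBracket, List.contains_cons,
    List.contains_nil, Bool.or_false]
  ac_rfl

-- A's connector test on one char is membership in B's connector alphabet
theorem connector_mem (c : Char) :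
    IsConnector c = (['|', '&', '-', '+'] : List Char).contains c := by
  simp only [IsConnector, List.contains_cons, List.contains_nil, Bool.or_false]
  ac_rfl

-- bracket detection both ways round: scanning the expression equals scanning the alphabet
theorem bracket_any (l : List Char) :
    l.any (fun c => IsOpeningBracket c || IsClosingBracket c)
      = (['(', ')', '[', ']'] : List Char).any (fun b => l.contains b) := by
  rw [Bool.eq_iff_iff]
  simp only [List.any_eq_true, bracket_mem, List.contains_eq_mem, decide_eq_true_eq]
  constructor
  · rintro ⟨x, hx, hm⟩; exact ⟨x, hm, hx⟩
  · rintro ⟨b, hb, hm⟩; exact ⟨b, hm, hb⟩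

-- the number of distinct connectors occurring in l equals the number of connector types present in l
theorem distinct_connectors_count (l : List Char) :
    (PySem.Set.ofList (l.filter IsConnector)).length
      = ((['|', '&', '-', '+'] : List Char).filter (fun c => l.contains c)).length := by
  apply List.Perm.length_eq
  rw [List.perm_ext_iff_of_nodup (PySem.Set.nodup_ofList _)
      (List.Nodup.filter _ (by decide : (['|', '&', '-', '+'] : List Char).Nodup))]
  intro a
  simp only [PySem.Set.mem_ofList, List.mem_filter, List.contains_eq_mem,
    connector_mem, decide_eq_true_eq]
  tauto

-- ===== VERDICT =====
theorem NoBracketsAndDiffConnectors_spec : Claim_equal_NoBracketsAndDiffConnectors := by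
  intro e _
  show NoBracketsAndDiffConnectors e = NoBracketsAndDiffConnectors_alt e
  unfold NoBracketsAndDiffConnectors NoBracketsAndDiffConnectors_alt
  rw [pvLoopA_char, bracket_any]
  by_cases hb : (['(', ')', '[', ']'] : List Char).any (fun b => e.toList.contains b) = true
  · rw [if_pos hb, if_pos hb]
  · rw [if_neg hb, if_neg hb, foldl_add_filter, ← PySem.Set.ofList_eq_foldl,
      distinct_connectors_count]
    have hsum : ((['|', '&', '-', '+'] : List Char).map
        (fun c => if e.toList.contains c then (1 : Int) else 0)).sum
        = (((['|', '&', '-', '+'] : List Char).filter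
            (fun c => e.toList.contains c)).length : Int) := by
      rw [PySem.List.sum_map_ite_one_zero, List.countP_eq_length_filter]
    rw [hsum]
    simp
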